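-- pv_equiv track=rewrite | github.com/pypi-data/pypi-mirror-376 | packages/music-creatingrhythms/music_creatingrhythms-0.1.0.tar.gz/music_creatingrhythms-0.1.0/src/music_creatingrhythms/music_creatingrhythms.py | b2int
-- ===== SOURCE A (Python) =====
-- def b2int(binary_str):
--     nbit = len(binary_str)
--     intervals = []
--     j = 0
--     while j < nbit:
--         k = 1
--         j += 1
--         while j < nbit and binary_str[j] != '1':
--             k += 1
--             j += 1
--         intervals.append(k)
--     return intervals
-- ===== SOURCE B (Python) =====
-- def b2int(binary_str):
--     n = len(binary_str)
--     marks = sorted({0, n} | {i for i, c in enumerate(binary_str) if c == '1'})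
--     return [b - a for a, b in zip(marks, marks[1:])]
-- ===== Notes on version B (the rewrite author's own statement) =====
-- stated objective: idiomatic
-- what changed: Replaced A's nested index-driven while-loop run counter with a marker decomposition: collect the set of '1' positions plus the endpoints 0 and len(s), sort it, and return consecutive differences.
import Mathlib
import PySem

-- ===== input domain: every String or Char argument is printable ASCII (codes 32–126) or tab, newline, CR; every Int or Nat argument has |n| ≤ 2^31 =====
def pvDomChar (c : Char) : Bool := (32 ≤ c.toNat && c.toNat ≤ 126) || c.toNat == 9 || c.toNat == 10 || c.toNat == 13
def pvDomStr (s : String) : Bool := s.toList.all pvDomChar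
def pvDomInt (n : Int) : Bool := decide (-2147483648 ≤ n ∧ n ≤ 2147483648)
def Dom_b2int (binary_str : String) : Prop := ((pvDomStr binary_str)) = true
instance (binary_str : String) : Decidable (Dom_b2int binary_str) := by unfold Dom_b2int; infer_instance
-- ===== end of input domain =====

-- B replaces A's nested while-loop run counter by the idiomatic marker decomposition
-- (sorted set of '1' positions plus both endpoints, then consecutive differences).

-- ===== PORT A =====
-- A's two nested while-loops over index j with counter k, as one structural
-- recursion over the untraversed suffix carrying the same counter k:
-- at each outer step one char is consumed (k = 1, j += 1), then the inner loop
-- consumes the following non-'1' chars incrementing k, and k is appended.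
def b2intGo : List Char → Int → List Int
  | [], k => [k]
  | c :: rest, k => if c = '1' then k :: b2intGo rest 1 else b2intGo rest (k + 1)

def b2int (binary_str : String) : List Int :=
  match binary_str.toList with
  | [] => []                       -- j = 0 = nbit: the outer loop never runs
  | _ :: rest => b2intGo rest 1    -- first outer iteration: k = 1, j = 1

-- ===== PORT B =====
-- {i for i, c in enumerate(binary_str) if c == '1'} as a list (it is duplicate-free)
def onesIdx (cs : List Char) (s : Int) : List Int :=
  (PySem.List.enumerate cs s).filterMap (fun p => if p.2 = '1' then some p.1 else none)

def b2int_alt (binary_str : String) : List Int :=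
  let n : Int := PySem.Str.len binary_str
  let marks : List Int :=
    PySem.List.sorted (PySem.Set.ofList ([0, n] ++ onesIdx binary_str.toList 0)) (fun x => x) false
  (marks.zip (PySem.List.slice marks (some 1) none)).map (fun p => p.2 - p.1)

-- ===== PRECONDITION & SPEC =====
def Spec_b2int (binary_str : String) (out : List Int) : Prop := out = b2int_alt binary_str
instance (binary_str : String) (out : List Int) : Decidable (Spec_b2int binary_str out) := by unfold Spec_b2int; infer_instance

-- ===== CLAIM (what is proved, stated in full; the proofs are below) =====
def Claim_equal_b2int : Prop := ∀ (binary_str : String), Dom_b2int binary_str → Spec_b2int binary_str (b2int binary_str)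

-- ===== LEMMAS AND PROOFS =====

-- consecutive differences of (a :: xs), i.e. zip-with-tail subtraction
def pvDiffs : Int → List Int → List Int
  | _, [] => []
  | a, b :: bs => (b - a) :: pvDiffs b bs

theorem pvDiffs_shift (a : Int) (xs : List Int) :
    pvDiffs (a + 1) (xs.map (· + 1)) = pvDiffs a xs := by
  induction xs generalizing a with
  | nil => rfl
  | cons b bs ih => simp [pvDiffs, ih]

theorem zip_tail_eq_pvDiffs (a : Int) (xs : List Int) :
    ((a :: xs).zip xs).map (fun p => p.2 - p.1) = pvDiffs a xs := by
  induction xs generalizing a with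
  | nil => rfl
  | cons b bs ih => simp [pvDiffs, ← ih]

theorem onesIdx_nil (s : Int) : onesIdx [] s = [] := rfl

theorem onesIdx_cons (c : Char) (cs : List Char) (s : Int) :
    onesIdx (c :: cs) s = (if c = '1' then [s] else []) ++ onesIdx cs (s + 1) := by
  by_cases h : c = '1' <;>
    simp [onesIdx, PySem.List.enumerate_cons, h]

theorem onesIdx_shift (cs : List Char) (s : Int) :
    onesIdx cs (s + 1) = (onesIdx cs s).map (· + 1) := by
  induction cs generalizing s with
  | nil => rfl
  | cons c rest ih => rw [onesIdx_cons, onesIdx_cons, ih]; split <;> simp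

theorem onesIdx_bounds (cs : List Char) (s : Int) :
    ∀ a ∈ onesIdx cs s, s ≤ a ∧ a < s + cs.length := by
  induction cs generalizing s with
  | nil => simp [onesIdx_nil]
  | cons c rest ih =>
      intro a ha
      rw [onesIdx_cons] at ha
      simp only [List.length_cons]
      rcases List.mem_append.1 ha with h | h
      · split at h <;> simp only [List.mem_singleton, List.not_mem_nil] at h
        · subst h; push_cast; omega
      · have := ih (s + 1) a h
        push_cast
        omega

theorem onesIdx_pairwise (cs : List Char) (s : Int) :
    (onesIdx cs s).Pairwise (· < ·) := by
  induction cs generalizing s with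
  | nil => simp [onesIdx_nil]
  | cons c rest ih =>
      rw [onesIdx_cons]
      refine List.pairwise_append.2 ⟨?_, ih (s + 1), ?_⟩
      · split <;> simp
      · intro a ha b hb
        have hb' := (onesIdx_bounds rest (s + 1) b hb).1
        split at ha <;> simp only [List.mem_singleton, List.not_mem_nil] at ha
        subst ha; omega

-- A's loop computes the consecutive differences of the '1'-markers and the right endpoint
theorem b2intGo_eq (cs : List Char) (k : Int) :
    b2intGo cs k = pvDiffs (-k) (onesIdx cs 0 ++ [(cs.length : Int)]) := by
  induction cs generalizing k with
  | nil => simp [b2intGo, onesIdx_nil, pvDiffs]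
  | cons c rest ih =>
      rw [b2intGo, onesIdx_cons]
      have hsh : onesIdx rest (0 + 1) = (onesIdx rest 0).map (· + 1) := onesIdx_shift rest 0
      split
      · rw [ih 1]
        simp only [List.cons_append, List.nil_append, pvDiffs, hsh]
        have : pvDiffs 0 ((onesIdx rest 0).map (· + 1) ++ [((rest.length : Int) + 1)]) =
            pvDiffs (-1) (onesIdx rest 0 ++ [(rest.length : Int)]) := by
          have := pvDiffs_shift (-1) (onesIdx rest 0 ++ [(rest.length : Int)])
          simpa using this
        simp only [List.length_cons]
        push_cast
        rw [this]
        ring_nf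
      · rw [ih (k + 1)]
        simp only [List.nil_append, hsh]
        have := pvDiffs_shift (-(k + 1)) (onesIdx rest 0 ++ [(rest.length : Int)])
        simp only [List.map_append, List.map_cons, List.map_nil] at this
        simp only [List.length_cons]
        push_cast
        rw [show -k = -(k+1) + 1 by ring, this]

-- the sorted deduplicated marker list, named explicitly
theorem marks_sorted (c : Char) (rest : List Char) :
    PySem.List.sorted
        (PySem.Set.ofList ([0, ((rest.length : Int) + 1)] ++ onesIdx (c :: rest) 0))
        (fun x => x) false
      = 0 :: (onesIdx rest 0).map (· + 1) ++ [((rest.length : Int) + 1)] := by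
  set n : Int := (rest.length : Int) + 1 with hn
  set O : List Int := (onesIdx rest 0).map (· + 1) with hO
  have hOb : ∀ a ∈ O, 1 ≤ a ∧ a < n := by
    intro a ha
    rw [hO] at ha
    obtain ⟨b, hb, rfl⟩ := List.mem_map.1 ha
    have := onesIdx_bounds rest 0 b hb
    constructor <;> omega
  have hOp : O.Pairwise (· < ·) := by
    rw [hO]
    exact List.Pairwise.map _ (fun a b h => by omega) (onesIdx_pairwise rest 0)
  have hys : (0 :: O ++ [n]).Pairwise ((· < ·) : Int → Int → Prop) := by
    refine List.pairwise_cons.2 ⟨?_, List.pairwise_append.2 ⟨hOp, by simp, ?_⟩⟩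
    · intro a ha
      rcases List.mem_append.1 ha with h | h
      · have := (hOb a h).1; omega
      · simp at h; omega
    · intro a ha b hb
      simp at hb; subst hb
      exact (hOb a ha).2
  refine PySem.List.sorted_eq_of_perm_of_pairwise_lt _ _ _ ?_ hys
  -- Perm: both are Nodup with the same members
  refine (List.perm_ext_iff_of_nodup hys.nodup (PySem.Set.nodup_ofList _)).2 ?_
  intro a
  rw [PySem.Set.mem_ofList, onesIdx_cons, onesIdx_shift]
  by_cases hc : c = '1' <;> simp [hc, hO] <;> aesop

theorem b2int_eq_alt (s : String) : b2int s = b2int_alt s := by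
  unfold b2int b2int_alt
  rw [PySem.Str.len_eq]
  cases hs : s.toList with
  | nil =>
      have h0 : PySem.List.sorted (PySem.Set.ofList ([(0 : Int), ((0 : Nat) : Int)] ++ onesIdx [] 0)) (fun x => x) false = [0] := by decide
      simp only [onesIdx_nil] at h0 ⊢
      rw [List.length_nil, h0]
      rfl
  | cons c rest =>
      simp only [List.length_cons]
      have hm := marks_sorted c rest
      push_cast
      rw [show ((0 : Int) :: [((rest.length : Int) + 1)]) = [0, ((rest.length : Int) + 1)] from rfl] at *
      rw [hm]
      rw [show (some (1 : Int)) = some ((1 : Nat) : Int) by norm_num,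
        PySem.List.slice_from_natCast]
      rw [List.drop_one]
      simp only [List.cons_append, List.tail_cons]
      rw [zip_tail_eq_pvDiffs 0 ((onesIdx rest 0).map (· + 1) ++ [((rest.length : Int) + 1)])]
      rw [b2intGo_eq]
      have h := pvDiffs_shift (-1) (onesIdx rest 0 ++ [(rest.length : Int)])
      simp only [List.map_append, List.map_cons, List.map_nil] at h
      norm_num at h ⊢
      exact h.symm

-- ===== VERDICT (by name: the statement is the Claim_ definition above) =====
theorem b2int_spec : Claim_equal_b2int := by
  intro s _
  exact b2int_eq_alt s
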